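-- pv_equiv track=rewrite | github.com/ge9598/yigent | src/providers/reasoning_extractor.py | _longest_tag_prefix_suffix
-- ===== SOURCE A (Python) =====
-- _OPEN_TAG = "<think>"
--
-- _CLOSE_TAG = "</think>"
--
-- _MAX_CARRY = max(len(_OPEN_TAG), len(_CLOSE_TAG)) - 1
--
-- def _longest_tag_prefix_suffix(buf: str) -> int:
--     """Longest suffix of ``buf`` that is a non-empty prefix of either tag.
--
--     Returns 0 if no such suffix exists. Example::
--
--         "text<thi"   → 4   ("<thi" is a prefix of "<think>")
--         "text</th"   → 4   ("</th" is a prefix of "</think>")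
--         "hello"      → 0   (no tag-prefix suffix)
--         "x<"         → 1   ("<" is a prefix of both tags)
--
--     Bounded by ``_MAX_CARRY`` — we never carry more than a tag's length minus
--     one, because a full tag would already have been matched by ``find``.
--     """
--     low = buf.lower()
--     limit = min(_MAX_CARRY, len(low))
--     for k in range(limit, 0, -1):
--         tail = low[-k:]
--         if _OPEN_TAG.startswith(tail) or _CLOSE_TAG.startswith(tail):
--             return k
--     return 0
-- ===== SOURCE B (Python) =====
-- _OPEN_TAG = "<think>"
--
-- _CLOSE_TAG = "</think>"
--
-- _MAX_CARRY = max(len(_OPEN_TAG), len(_CLOSE_TAG)) - 1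
--
-- def _longest_tag_prefix_suffix(buf: str) -> int:
--     # Any non-empty prefix of either tag starts with '<', and neither tag
--     # contains '<' later on; so the only candidate suffix starts at the last
--     # '<' within the final _MAX_CARRY characters.  Slice, locate it with
--     # rfind, verify once.
--     tail = buf[-_MAX_CARRY:].lower()
--     idx = tail.rfind('<')
--     if idx == -1:
--         return 0
--     t = tail[idx:]
--     if _OPEN_TAG.startswith(t) or _CLOSE_TAG.startswith(t):
--         return len(t)
--     return 0
-- ===== Notes on version B (the rewrite author's own statement) =====
-- stated objective: simpler
-- what changed: Replaces A's descending loop over candidate suffix lengths (testing each suffix against both tags) by slicing the last _MAX_CARRY characters, locating the final open-angle-bracket character with rfind, and verifying that single candidate once.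
import Mathlib
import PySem

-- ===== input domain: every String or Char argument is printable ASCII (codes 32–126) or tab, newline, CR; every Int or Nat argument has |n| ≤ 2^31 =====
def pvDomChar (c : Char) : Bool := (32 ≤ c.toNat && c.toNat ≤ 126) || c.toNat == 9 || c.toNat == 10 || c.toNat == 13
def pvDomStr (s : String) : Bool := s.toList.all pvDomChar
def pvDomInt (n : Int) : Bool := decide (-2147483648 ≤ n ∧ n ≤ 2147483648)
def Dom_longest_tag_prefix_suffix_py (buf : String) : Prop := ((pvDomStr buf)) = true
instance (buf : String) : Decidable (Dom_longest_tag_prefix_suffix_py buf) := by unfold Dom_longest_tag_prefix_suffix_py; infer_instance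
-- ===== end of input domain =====

-- B replaces A's descending loop over candidate suffix lengths by: slice the last
-- _MAX_CARRY chars, rfind the last '<', and verify that single candidate once (simpler).


-- ===== PORT A =====
-- for k in range(limit, 0, -1): tail = low[-k:]; if tag.startswith(tail): return k
def pyA_loop (low : String) : Nat → Int
  | 0 => 0
  | k + 1 =>
      let tail := PySem.Str.slice low (some (-((k : Int) + 1))) none
      if PySem.Str.startswith "<think>" tail || PySem.Str.startswith "</think>" tail then
        ((k : Int) + 1)
      else pyA_loop low k

def longest_tag_prefix_suffix_py (buf : String) : Int :=
  let low := PySem.Str.lower buf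
  let limit := min 7 low.toList.length
  pyA_loop low limit

-- ===== PORT B =====
def longest_tag_prefix_suffix_py_alt (buf : String) : Int :=
  let tail := PySem.Str.lower (PySem.Str.slice buf (some (-7)) none)
  let idx := PySem.Str.rfind tail "<"
  if idx = -1 then 0
  else
    let t := PySem.Str.slice tail (some idx) none
    if PySem.Str.startswith "<think>" t || PySem.Str.startswith "</think>" t then
      PySem.Str.len t
    else 0

-- ===== PRECONDITION & SPEC =====
def Spec_longest_tag_prefix_suffix_py (buf : String) (out : Int) : Prop := out = longest_tag_prefix_suffix_py_alt buf
instance (buf : String) (out : Int) : Decidable (Spec_longest_tag_prefix_suffix_py buf out) := by unfold Spec_longest_tag_prefix_suffix_py; infer_instance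

-- ===== CLAIM (what is proved, stated in full; the proofs are below) =====
def Claim_equal_longest_tag_prefix_suffix_py : Prop := ∀ (buf : String), Dom_longest_tag_prefix_suffix_py buf → Spec_longest_tag_prefix_suffix_py buf (longest_tag_prefix_suffix_py buf)

-- ===== LEMMAS AND PROOFS =====

-- the shared match condition, on the list side
def pvCond (u : List Char) : Bool :=
  PySem.Chars.startswith "<think>".toList u || PySem.Chars.startswith "</think>".toList u

lemma single_isPrefixOf_iff (c : Char) (xs : List Char) :
    [c].isPrefixOf xs = true ↔ xs[0]? = some c := by
  rw [List.isPrefixOf_iff_prefix]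
  cases xs with
  | nil => simp
  | cons a l => simp [List.cons_prefix_iff, eq_comm]

-- spec of PySem.Chars.rfind.go for a single-character needle
lemma rfind_go_spec (t : List Char) (c : Char) (k : Nat) :
    (PySem.Chars.rfind.go t [c] k = -1 ∧ ∀ j ≤ k, t[j]? ≠ some c) ∨
    (∃ i : Nat, i ≤ k ∧ PySem.Chars.rfind.go t [c] k = (i : Int) ∧ t[i]? = some c ∧
      ∀ j, i < j → j ≤ k → t[j]? ≠ some c) := by
  induction k with
  | zero =>
      by_cases h : t[0]? = some c
      · right; exact ⟨0, le_refl 0, by simp [PySem.Chars.rfind.go, (single_isPrefixOf_iff c t).mpr h], h, by omega⟩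
      · left
        constructor
        · simp only [PySem.Chars.rfind.go]
          rw [if_neg]; intro hp; exact h ((single_isPrefixOf_iff c t).mp hp)
        · intro j hj; interval_cases j; exact h
  | succ k ih =>
      by_cases h : t[k + 1]? = some c
      · right
        refine ⟨k + 1, le_refl _, ?_, h, by omega⟩
        have hpref : [c].isPrefixOf (t.drop (k + 1)) = true := by
          rw [single_isPrefixOf_iff]
          simpa [List.getElem?_drop] using h
        simp [PySem.Chars.rfind.go, hpref]
      · have hgo : PySem.Chars.rfind.go t [c] (k + 1) = PySem.Chars.rfind.go t [c] k := by
          simp only [PySem.Chars.rfind.go]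
          rw [if_neg]
          intro hp
          rw [single_isPrefixOf_iff] at hp
          rw [List.getElem?_drop] at hp
          simp at hp
          exact h hp
        rcases ih with ⟨h1, h2⟩ | ⟨i, hik, hval, hhit, hafter⟩
        · left
          refine ⟨by rw [hgo]; exact h1, ?_⟩
          intro j hj
          rcases Nat.lt_or_ge j (k + 1) with hlt | hge
          · exact h2 j (by omega)
          · have hje : j = k + 1 := by omega
            rw [hje]; exact h
        · right
          refine ⟨i, by omega, by rw [hgo]; exact hval, hhit, ?_⟩
          intro j hj1 hj2
          rcases Nat.lt_or_ge j (k + 1) with hlt | hge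
          · exact hafter j hj1 (by omega)
          · have hje : j = k + 1 := by omega
            rw [hje]; exact h

-- a non-empty prefix of either tag starts with '<' and has no later '<'
lemma prefix_tag_spec {u tag : List Char}
    (h0 : tag[0]? = some '<')
    (h1 : ∀ i, i < tag.length → 0 < i → tag[i]? ≠ some '<')
    (h : u <+: tag) (hne : u ≠ []) :
    u[0]? = some '<' ∧ ∀ i, 0 < i → u[i]? ≠ some '<' := by
  obtain ⟨r, hr⟩ := h
  have hget : ∀ i, i < u.length → u[i]? = tag[i]? := by
    intro i hi
    rw [← hr, List.getElem?_append_left hi]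
  have hlen : u.length ≤ tag.length := by
    rw [← hr]; simp
  have hul : 0 < u.length := List.length_pos_iff.mpr hne
  refine ⟨by rw [hget 0 hul]; exact h0, ?_⟩
  intro i hi hc
  have hiu : i < u.length := by
    by_contra hge
    rw [List.getElem?_eq_none_iff.mpr (by omega)] at hc
    simp at hc
  rw [hget i hiu] at hc
  exact h1 i (by omega) hi hc

-- if pvCond holds on t.drop p, then t has '<' at p and nowhere later
lemma cond_spec {t : List Char} {p : Nat} (hp : p < t.length)
    (hc : pvCond (t.drop p) = true) :
    t[p]? = some '<' ∧ ∀ j, p < j → t[j]? ≠ some '<' := by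
  have hne : t.drop p ≠ [] := by
    intro h
    have := congrArg List.length h
    simp at this; omega
  have key : (t.drop p)[0]? = some '<' ∧ ∀ i, 0 < i → (t.drop p)[i]? ≠ some '<' := by
    rw [pvCond, Bool.or_eq_true, PySem.Chars.startswith_iff, PySem.Chars.startswith_iff] at hc
    rcases hc with h | h
    · exact prefix_tag_spec (by decide) (by decide) h hne
    · exact prefix_tag_spec (by decide) (by decide) h hne
  obtain ⟨k0, kLater⟩ := key
  constructor
  · rw [List.getElem?_drop] at k0
    simpa using k0
  · intro j hj hc'
    have hlk := kLater (j - p) (by omega)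
    rw [List.getElem?_drop] at hlk
    have hpj : p + (j - p) = j := by omega
    rw [hpj] at hlk
    exact hlk hc'

-- loop unfolding in list form
lemma pyA_loop_succ (low : String) (k : Nat) :
    pyA_loop low (k + 1) =
      if pvCond (low.toList.drop (low.toList.length - (k + 1))) = true then ((k : Int) + 1)
      else pyA_loop low k := by
  have hs : (PySem.Str.slice low (some (-((k : Int) + 1))) none).toList
      = low.toList.drop (low.toList.length - (k + 1)) := by
    rw [PySem.Str.toList_slice, PySem.Chars.slice_eq_listSlice]
    have hcast : -((k : Int) + 1) = -(((k + 1 : Nat) : Int)) := by push_cast; ring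
    rw [hcast, PySem.List.slice_from_neg_natCast _ _ (by omega)]
  simp only [pyA_loop, pvCond, PySem.Str.startswith_eq, hs]
  rfl

-- the loop returns 0 when t (the last min(7,n) chars of low) contains no '<'
lemma loop_no_lt (low : String) (t : List Char) (m : Nat)
    (ht : ∀ k, 1 ≤ k → k ≤ m → low.toList.drop (low.toList.length - k) = t.drop (m - k))
    (hmt : m = t.length)
    (hno : ∀ j : Nat, t[j]? ≠ some '<') :
    ∀ k, k ≤ m → pyA_loop low k = 0 := by
  intro k
  induction k with
  | zero => intro _; simp [pyA_loop]
  | succ k ih =>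
      intro hk
      rw [pyA_loop_succ low k, ht (k + 1) (by omega) hk]
      have hcf : pvCond (t.drop (m - (k + 1))) = false := by
        by_contra h
        have hc := cond_spec (t := t) (p := m - (k + 1)) (by omega) (by simpa using h)
        exact hno _ hc.1
      rw [hcf]
      simpa using ih (by omega)

-- the loop value when position i is the last '<' of t
lemma loop_last_lt (low : String) (t : List Char) (m i : Nat)
    (ht : ∀ k, 1 ≤ k → k ≤ m → low.toList.drop (low.toList.length - k) = t.drop (m - k))
    (hmt : m = t.length)
    (hi : t[i]? = some '<') (hafter : ∀ j : Nat, i < j → t[j]? ≠ some '<') :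
    ∀ k, k ≤ m →
      pyA_loop low k =
        if m - i ≤ k ∧ pvCond (t.drop i) = true then ((m - i : Nat) : Int) else 0 := by
  have him : i < m := by
    obtain ⟨h, -⟩ := List.getElem?_eq_some_iff.mp hi
    omega
  intro k
  induction k with
  | zero =>
      intro _
      have hcd : ¬(m - i ≤ 0 ∧ pvCond (t.drop i) = true) := by
        rintro ⟨h1, -⟩; omega
      rw [if_neg hcd]
      simp [pyA_loop]
  | succ k ih =>
      intro hk
      rw [pyA_loop_succ low k, ht (k + 1) (by omega) hk]
      by_cases hc : pvCond (t.drop (m - (k + 1))) = true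
      · have hs := cond_spec (t := t) (p := m - (k + 1)) (by omega) hc
        have hpi : m - (k + 1) = i := by
          rcases Nat.lt_trichotomy (m - (k + 1)) i with h | h | h
          · exact absurd hi (hs.2 i h)
          · exact h
          · exact absurd hs.1 (hafter _ h)
        rw [if_pos hc, if_pos ⟨by omega, hpi ▸ hc⟩]
        omega
      · rw [Bool.not_eq_true] at hc
        rw [if_neg (by simp [hc]), ih (by omega)]
        by_cases hd : m - i ≤ k ∧ pvCond (t.drop i) = true
        · rw [if_pos hd, if_pos ⟨by omega, hd.2⟩]
        · have hnd : ¬(m - i ≤ k + 1 ∧ pvCond (t.drop i) = true) := by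
            rintro ⟨h1, h2⟩
            apply hd
            refine ⟨?_, h2⟩
            by_contra hgt
            have hpi : m - (k + 1) = i := by omega
            rw [hpi, h2] at hc
            simp at hc
          rw [if_neg hd, if_neg hnd]

-- the two ports agree on every input
lemma main_eq (buf : String) :
    longest_tag_prefix_suffix_py buf = longest_tag_prefix_suffix_py_alt buf := by
  simp only [longest_tag_prefix_suffix_py, longest_tag_prefix_suffix_py_alt]
  set low := PySem.Str.lower buf with hlow
  set S := PySem.Str.lower (PySem.Str.slice buf (some (-7)) none) with hS
  set t := S.toList with ht0
  set m := t.length with hm0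
  -- t is the last min(7, n) characters of low
  have hT : t = low.toList.drop (low.toList.length - 7) := by
    rw [ht0, hS, hlow]
    rw [PySem.Str.toList_lower, PySem.Str.toList_slice, PySem.Chars.slice_eq_listSlice,
        PySem.List.slice_from_neg_ofNat _ 7 (by norm_num), PySem.Str.toList_lower]
    simp [PySem.Chars.lower, List.map_drop]
  have hmn : m = min 7 low.toList.length := by
    rw [hm0, hT, List.length_drop]; omega
  have ht : ∀ k, 1 ≤ k → k ≤ m → low.toList.drop (low.toList.length - k) = t.drop (m - k) := by
    intro k h1 h2
    rw [hT, List.drop_drop]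
    have harg : low.toList.length - 7 + (m - k) = low.toList.length - k := by omega
    rw [harg]
  have hrf : PySem.Str.rfind S "<" = PySem.Chars.rfind.go t ['<'] m := by
    rw [PySem.Str.rfind_eq, ← ht0]
    have h2 : "<".toList = ['<'] := by decide
    rw [h2, PySem.Chars.rfind, ← hm0]
  rcases rfind_go_spec t '<' m with ⟨hval, hnone⟩ | ⟨i, him, hval, hhit, hafter⟩
  · -- no '<' in t at all: both sides are 0
    have hno : ∀ j : Nat, t[j]? ≠ some '<' := by
      intro j
      rcases Nat.lt_or_ge j m with h | h
      · exact hnone j (by omega)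
      · rw [List.getElem?_eq_none_iff.mpr (by omega)]; simp
    rw [hrf, hval, if_pos rfl, ← hmn]
    exact loop_no_lt low t m ht hm0 hno m (le_refl m)
  · -- the last '<' of t sits at position i
    have him' : i < m := by
      obtain ⟨h, -⟩ := List.getElem?_eq_some_iff.mp hhit
      omega
    have hafter' : ∀ j : Nat, i < j → t[j]? ≠ some '<' := by
      intro j hj
      rcases Nat.lt_or_ge j m with h | h
      · exact hafter j hj (by omega)
      · rw [List.getElem?_eq_none_iff.mpr (by omega)]; simp
    rw [hrf, hval, if_neg (by omega), ← hmn]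
    rw [loop_last_lt low t m i ht hm0 hhit hafter' m (le_refl m)]
    have htl : (PySem.Str.slice S (some (i : Int)) none).toList = t.drop i := by
      rw [PySem.Str.toList_slice, PySem.Chars.slice_eq_listSlice, ← ht0,
          PySem.List.slice_from _ _]
      · simp
      · omega
    have hlen : PySem.Str.len (PySem.Str.slice S (some (i : Int)) none) = ((m - i : Nat) : Int) := by
      rw [PySem.Str.len_eq, htl, List.length_drop, ← hm0]
    simp only [PySem.Str.startswith_eq, htl, hlen]
    by_cases hc : pvCond (t.drop i) = true
    · rw [if_pos ⟨by omega, hc⟩, if_pos (by rw [pvCond] at hc; simpa using hc)]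
    · rw [Bool.not_eq_true] at hc
      rw [if_neg (by simp [hc]), if_neg (by rw [pvCond] at hc; simpa using hc)]

-- ===== VERDICT (by name: the statement is the Claim_ definition above) =====
theorem longest_tag_prefix_suffix_py_spec : Claim_equal_longest_tag_prefix_suffix_py := by
  intro buf _
  unfold Spec_longest_tag_prefix_suffix_py
  exact main_eq buf
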